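-- pv_equiv track=rewrite | github.com/aaron-93/spartaAlgorithm | Week_2/homework/03_get_count_of_ways_to_target_by_doing_plus_or_minus.py | get_count_of_ways_to_target_by_doing_plus_or_minus
-- ===== SOURCE A (Python) =====
-- def get_count_of_ways_to_target_by_doing_plus_or_minus(array, target):
--     list = [0]
--     for i in array:
--         cal_list = []
--         for j in list:
--             cal_list.append(j+1)
--             cal_list.append(j-1)
--         list = cal_list
--
--     return list.count(target)
-- ===== SOURCE B (Python) =====
-- def get_count_of_ways_to_target_by_doing_plus_or_minus(array, target):
--     # Closed-form via Pascal's triangle: the answer depends only on len(array);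
--     # it is C(n, (n+target)//2) when n+target is even and |target| <= n, else 0.
--     n = len(array)
--     if (n + target) % 2 != 0 or target < -n or target > n:
--         return 0
--     row = [1]
--     for k in range(n):
--         row = [1] + [row[j] + row[j + 1] for j in range(k)] + [1]
--     return row[(n + target) // 2]
-- ===== Notes on version B (the rewrite author's own statement) =====
-- stated objective: faster
-- what changed: A explodes every +/-1 sequence into a list of 2^n sums and counts the target; B notes only len(array) matters and returns the binomial coefficient C(n,(n+target)/2) computed from one Pascal row, with a parity/range check.
import Mathlib
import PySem

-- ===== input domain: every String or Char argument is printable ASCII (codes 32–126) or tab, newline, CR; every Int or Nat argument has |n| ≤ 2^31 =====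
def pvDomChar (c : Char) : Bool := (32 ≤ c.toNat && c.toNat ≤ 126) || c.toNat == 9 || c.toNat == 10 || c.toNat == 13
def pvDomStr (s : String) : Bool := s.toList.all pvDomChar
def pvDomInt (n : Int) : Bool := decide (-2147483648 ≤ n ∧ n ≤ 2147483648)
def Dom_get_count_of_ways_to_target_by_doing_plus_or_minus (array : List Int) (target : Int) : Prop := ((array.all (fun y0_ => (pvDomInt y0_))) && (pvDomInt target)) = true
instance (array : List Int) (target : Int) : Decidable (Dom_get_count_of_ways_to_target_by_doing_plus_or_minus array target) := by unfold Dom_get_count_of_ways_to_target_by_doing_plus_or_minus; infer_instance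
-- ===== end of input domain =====

-- B replaces A's 2^n enumeration of all ±1 sums by one Pascal row giving C(n,(n+target)/2); objective: faster (asymptotic).

-- ===== PORT A =====
-- A: explode all ±1 sums into a list, then count the target.
def get_count_of_ways_to_target_by_doing_plus_or_minus (array : List Int) (target : Int) : Int :=
  let lst := array.foldl (fun lst _i => lst.foldl (fun cal j => cal ++ [j + 1] ++ [j - 1]) []) [0]
  ((PySem.List.count lst target : Nat) : Int)

-- ===== PORT B =====
-- B: parity/range check, then Pascal's row built iteratively; row indexing is always in range, ported as getD.
def get_count_of_ways_to_target_by_doing_plus_or_minus_alt (array : List Int) (target : Int) : Int :=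
  let n := array.length
  if PySem.Int.mod ((n : Int) + target) 2 ≠ 0 ∨ target < -(n : Int) ∨ target > (n : Int) then 0
  else
    let row := (List.range n).foldl
      (fun row k => [1] ++ ((List.range k).map (fun j => row.getD j 0 + row.getD (j + 1) 0)) ++ [(1 : Int)]) [1]
    row.getD (PySem.Int.floordiv ((n : Int) + target) 2).toNat 0

-- ===== PRECONDITION & SPEC =====
def Spec_get_count_of_ways_to_target_by_doing_plus_or_minus (array : List Int) (target : Int) (out : Int) : Prop := out = get_count_of_ways_to_target_by_doing_plus_or_minus_alt array target
instance (array : List Int) (target : Int) (out : Int) : Decidable (Spec_get_count_of_ways_to_target_by_doing_plus_or_minus array target out) := by unfold Spec_get_count_of_ways_to_target_by_doing_plus_or_minus; infer_instance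

-- ===== CLAIM (what is proved, stated in full; the proofs are below) =====
def Claim_equal_get_count_of_ways_to_target_by_doing_plus_or_minus : Prop := ∀ (array : List Int) (target : Int), Dom_get_count_of_ways_to_target_by_doing_plus_or_minus array target → Spec_get_count_of_ways_to_target_by_doing_plus_or_minus array target (get_count_of_ways_to_target_by_doing_plus_or_minus array target)

-- ===== LEMMAS AND PROOFS =====

-- number of ±1 sequences of length n summing to t
def pvW : Nat → Int → Nat
  | 0, t => if t = 0 then 1 else 0
  | n + 1, t => pvW n (t - 1) + pvW n (t + 1)

def pvStep (L : List Int) : List Int := L.foldl (fun cal j => cal ++ [j + 1] ++ [j - 1]) []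

theorem pvStep_foldl (L acc : List Int) :
    L.foldl (fun cal j => cal ++ [j + 1] ++ [j - 1]) acc = acc ++ L.flatMap (fun j => [j + 1, j - 1]) := by
  induction L generalizing acc with
  | nil => simp
  | cons x xs ih => simp [List.foldl_cons, List.flatMap_def]

theorem pvStep_eq (L : List Int) : pvStep L = L.flatMap (fun j => [j + 1, j - 1]) := by
  unfold pvStep
  rw [pvStep_foldl]
  simp

theorem count_pvStep (L : List Int) (t : Int) :
    (pvStep L).count t = L.count (t - 1) + L.count (t + 1) := by
  rw [pvStep_eq]
  induction L with
  | nil => simp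
  | cons x xs ih =>
    simp only [List.flatMap_cons, List.count_append, List.count_cons, List.count_nil, ih,
      beq_iff_eq]
    split_ifs <;> omega

theorem foldl_pvStep (array : List Int) (L : List Int) :
    array.foldl (fun lst _i => pvStep lst) L = pvStep^[array.length] L := by
  induction array generalizing L with
  | nil => simp
  | cons a as ih => simp [List.foldl_cons, ih, Function.iterate_succ_apply]

theorem count_iterate (n : Nat) (t : Int) :
    (pvStep^[n] [(0 : Int)]).count t = pvW n t := by
  induction n generalizing t with
  | zero => simp [pvW, List.count_cons, List.count_nil]; split <;> simp_all; omega
  | succ n ih =>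
    rw [Function.iterate_succ_apply', count_pvStep, ih, ih, pvW]

theorem pvW_eq_zero (n : Nat) (t : Int)
    (h : t < -(n : Int) ∨ (n : Int) < t ∨ ((n : Int) + t) % 2 ≠ 0) : pvW n t = 0 := by
  induction n generalizing t with
  | zero =>
    have ht : t ≠ 0 := by omega
    simp [pvW, ht]
  | succ n ih =>
    have h1 : pvW n (t - 1) = 0 := by apply ih; push_cast at h ⊢; omega
    have h2 : pvW n (t + 1) = 0 := by apply ih; push_cast at h ⊢; omega
    simp [pvW, h1, h2]

theorem pvW_choose (n : Nat) (j : Nat) (hj : j ≤ n) :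
    pvW n (2 * (j : Int) - n) = n.choose j := by
  induction n generalizing j with
  | zero =>
    interval_cases j
    simp [pvW]
  | succ n ih =>
    rcases Nat.eq_zero_or_pos j with rfl | hpos
    · have h1 : pvW n (2 * ((0 : Nat) : Int) - (n + 1 : Nat) - 1) = 0 := by
        apply pvW_eq_zero; push_cast; omega
      have h2 : (2 * ((0 : Nat) : Int) - (n + 1 : Nat) + 1) = 2 * ((0 : Nat) : Int) - n := by
        push_cast; ring
      simp only [pvW, h1, h2, ih 0 (Nat.zero_le n)]
      simp
    · rcases Nat.lt_or_ge j (n + 1) with hlt | hge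
      · -- 1 ≤ j ≤ n
        have hjn : j ≤ n := by omega
        obtain ⟨k, rfl⟩ : ∃ k, j = k + 1 := ⟨j - 1, by omega⟩
        have e1 : (2 * ((k + 1 : Nat) : Int) - ((n + 1 : Nat) : Int) - 1) = 2 * (k : Int) - n := by
          push_cast; ring
        have e2 : (2 * ((k + 1 : Nat) : Int) - ((n + 1 : Nat) : Int) + 1) = 2 * ((k + 1 : Nat) : Int) - n := by
          push_cast; ring
        simp only [pvW, e1, e2, ih k (by omega), ih (k + 1) hjn]
        rw [Nat.choose_succ_succ']
      · -- j = n + 1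
        have hj1 : j = n + 1 := by omega
        subst hj1
        have e1 : (2 * ((n + 1 : Nat) : Int) - ((n + 1 : Nat) : Int) - 1) = 2 * (n : Int) - n := by
          push_cast; ring
        have h2 : pvW n (2 * ((n + 1 : Nat) : Int) - ((n + 1 : Nat) : Int) + 1) = 0 := by
          apply pvW_eq_zero; push_cast; omega
        simp only [pvW, e1, h2, ih n le_rfl]
        simp

theorem getD_map_range {m j : Nat} (f : Nat → Int) (hj : j < m) :
    ((List.range m).map f).getD j 0 = f j := by
  rw [List.getD_eq_getElem?_getD]
  simp [hj]

def pvRowF (row : List Int) (k : Nat) : List Int :=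
  [1] ++ ((List.range k).map (fun j => row.getD j 0 + row.getD (j + 1) 0)) ++ [(1 : Int)]

theorem pvRow_eq (n : Nat) :
    (List.range n).foldl pvRowF [1] = (List.range (n + 1)).map (fun j => (n.choose j : Int)) := by
  induction n with
  | zero => simp
  | succ n ih =>
    rw [List.range_succ, List.foldl_append, ih]
    show pvRowF _ n = _
    unfold pvRowF
    have hmap : (List.range n).map
        (fun j => ((List.range (n + 1)).map (fun j => (n.choose j : Int))).getD j 0 +
                  ((List.range (n + 1)).map (fun j => (n.choose j : Int))).getD (j + 1) 0)
        = (List.range n).map (fun j => (((n + 1).choose (j + 1) : Nat) : Int)) := by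
      apply List.map_congr_left
      intro j hjmem
      have hj : j < n := List.mem_range.mp hjmem
      rw [getD_map_range _ (by omega), getD_map_range _ (by omega)]
      rw [Nat.choose_succ_succ']
      push_cast; ring
    rw [hmap]
    have h2 : List.range (n + 1 + 1) = 0 :: (List.range (n + 1)).map Nat.succ :=
      List.range_succ_eq_map
    rw [h2, List.map_cons, List.range_succ, List.map_append, List.map_append,
      List.map_map, List.map_map]
    simp [Function.comp_def]

theorem alt_eq_pvW (array : List Int) (target : Int) :
    get_count_of_ways_to_target_by_doing_plus_or_minus_alt array target = pvW array.length target := by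
  show (if PySem.Int.mod ((array.length : Int) + target) 2 ≠ 0 ∨ target < -(array.length : Int) ∨ target > (array.length : Int) then 0
    else ((List.range array.length).foldl pvRowF [1]).getD
      (PySem.Int.floordiv ((array.length : Int) + target) 2).toNat 0) = pvW array.length target
  set n := array.length with hn
  rw [PySem.Int.mod_eq_emod_of_pos (by norm_num), PySem.Int.floordiv_eq_ediv_of_pos (by norm_num)]
  split
  · next h =>
    rw [pvW_eq_zero n target (by omega)]
    simp
  · next h =>
    simp only [not_or, ne_eq, not_not, not_lt] at h
    obtain ⟨hpar, hlo, hhi⟩ := h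
    set j := (((n : Int) + target) / 2).toNat with hj
    have hnt : (0 : Int) ≤ (n : Int) + target := by omega
    have hjval : (j : Int) = ((n : Int) + target) / 2 := Int.toNat_of_nonneg (by omega)
    have ht : target = 2 * (j : Int) - n := by omega
    have hjn : j ≤ n := by omega
    show ((List.range n).foldl pvRowF [1]).getD j 0 = pvW n target
    rw [pvRow_eq, getD_map_range _ (by omega), ht, pvW_choose n j hjn]

theorem a_eq_pvW (array : List Int) (target : Int) :
    get_count_of_ways_to_target_by_doing_plus_or_minus array target = pvW array.length target := by
  unfold get_count_of_ways_to_target_by_doing_plus_or_minus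
  show ((PySem.List.count (array.foldl (fun lst _i => lst.foldl (fun cal j => cal ++ [j + 1] ++ [j - 1]) []) [0]) target : Nat) : Int) = _
  have hstep : (fun (lst : List Int) (_i : Int) => lst.foldl (fun cal j => cal ++ [j + 1] ++ [j - 1]) []) = fun lst _i => pvStep lst := rfl
  rw [PySem.List.count_eq, hstep, foldl_pvStep, count_iterate]

-- ===== VERDICT (by name: the statement is the Claim_ definition above) =====
theorem get_count_of_ways_to_target_by_doing_plus_or_minus_spec : Claim_equal_get_count_of_ways_to_target_by_doing_plus_or_minus := by
  intro array target _hdom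
  unfold Spec_get_count_of_ways_to_target_by_doing_plus_or_minus
  rw [a_eq_pvW, alt_eq_pvW]
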